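-- pv_equiv track=rewrite | github.com/SEOULVING-C1UB/Daily-Algorithm | Daily-Algo/2020-10-29/베이비진게임/신누리_베이비진게임.py | babygin
-- ===== SOURCE A (Python) =====
-- def babygin(li):
--     li.sort()
--     run = 0
--     triplet = 0
--     for i in range(1, len(li)):
--         if li[i] == li[i-1]:
--             triplet +=1
--         else:
--             triplet = 0
--         if li[i] == li[i-1]+1:
--             run += 1
--         else:
--             if li[i] != li[i-1]: # 7 8 8 9 도 연속임을 고려하지 않았었음 :(
--                 run = 0
--         if triplet>=2 or run>=2:
--             return True
--     return False
-- ===== SOURCE B (Python) =====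
-- def babygin(li):
--     li.sort()
--     counts = {}
--     for x in li:
--         counts[x] = counts.get(x, 0) + 1
--     if any(c >= 3 for c in counts.values()):
--         return True
--     return any(x + 1 in counts and x + 2 in counts for x in counts)
-- ===== Notes on version B (the rewrite author's own statement) =====
-- stated objective: idiomatic
-- what changed: Replaces the fused sorted-scan with run/triplet counters by a frequency dict built in one pass plus two separate existence checks: any count >= 3 (triplet) or any value x with x+1 and x+2 both present (run of three); li.sort() is kept for the in-place mutation side effect.
import Mathlib
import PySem

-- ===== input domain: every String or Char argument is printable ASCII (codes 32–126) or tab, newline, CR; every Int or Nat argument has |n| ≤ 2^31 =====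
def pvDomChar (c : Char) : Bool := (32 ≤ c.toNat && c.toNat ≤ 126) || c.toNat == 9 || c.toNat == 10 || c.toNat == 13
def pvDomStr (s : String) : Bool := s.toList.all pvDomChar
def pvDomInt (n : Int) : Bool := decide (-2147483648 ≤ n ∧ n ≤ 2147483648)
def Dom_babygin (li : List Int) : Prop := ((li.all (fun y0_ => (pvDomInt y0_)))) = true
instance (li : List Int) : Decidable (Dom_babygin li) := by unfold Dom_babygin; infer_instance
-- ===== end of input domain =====

-- B changes the algorithm (set + two existence checks instead of a fused counter scan); equivalence is about
-- the return value only — both Pythons sort the caller's list in place.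

-- ===== PORT A =====
-- the for-loop over i in range(1, len(li)), reading li[i] and li[i-1], as structural
-- recursion carrying the previous element and the two counters; early 'return True' = stop with true
def babyginGo : Int → Int → Int → List Int → Bool
  | _, _, _, [] => false
  | prev, triplet, run, x :: rest =>
    let t := if x = prev then triplet + 1 else 0
    let r := if x = prev + 1 then run + 1 else if x ≠ prev then 0 else run
    if 2 ≤ t ∨ 2 ≤ r then true else babyginGo x t r rest

def babygin (li : List Int) : Bool :=
  match PySem.List.sorted li (fun x => x) false with
  | [] => false
  | h :: rest => babyginGo h 0 0 rest

-- ===== PORT B =====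
-- 'for x in li: counts[x] = counts.get(x, 0) + 1' is exactly collections-style counting: PySem.Dict.counter
def babygin_alt (li : List Int) : Bool :=
  let s := PySem.List.sorted li (fun x => x) false
  let counts : PySem.Dict Int Int := PySem.Dict.counter s
  if (PySem.Dict.values counts).any (fun c => 3 ≤ c) then true
  else (PySem.Dict.keys counts).any (fun x => counts.contains (x + 1) && counts.contains (x + 2))

-- ===== PRECONDITION & SPEC =====
def Spec_babygin (li : List Int) (out : Bool) : Prop := out = babygin_alt li
instance (li : List Int) (out : Bool) : Decidable (Spec_babygin li out) := by unfold Spec_babygin; infer_instance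

-- ===== CLAIM (what is proved, stated in full; the proofs are below) =====
def Claim_equal_babygin : Prop := ∀ (li : List Int), Dom_babygin li → Spec_babygin li (babygin li)

-- ===== LEMMAS AND PROOFS =====

-- proof-only helpers: the two counters evolve independently; split the fused scan
def tripGo : Int → Int → List Int → Bool
  | _, _, [] => false
  | prev, triplet, x :: rest =>
    let t := if x = prev then triplet + 1 else 0
    (2 ≤ t : Bool) || tripGo x t rest

def runGo : Int → Int → List Int → Bool
  | _, _, [] => false
  | prev, run, x :: rest =>
    let r := if x = prev + 1 then run + 1 else if x ≠ prev then 0 else run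
    (2 ≤ r : Bool) || runGo x r rest

def Run3 (s : List Int) : Prop := ∃ x, x ∈ s ∧ x + 1 ∈ s ∧ x + 2 ∈ s

theorem babyginGo_eq (l : List Int) : ∀ prev t r,
    babyginGo prev t r l = (tripGo prev t l || runGo prev r l) := by
  induction l with
  | nil => intro prev t r; rfl
  | cons x rest ih =>
    intro prev t r
    simp only [babyginGo, tripGo, runGo]
    by_cases he : x = prev <;> by_cases hs : x = prev + 1 <;>
      simp [he, hs, ih, Bool.or_comm, Bool.or_left_comm, Bool.or_assoc]

theorem tripGo_iff (l : List Int) : ∀ prev (t : Int),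
    (prev :: l).Pairwise (· ≤ ·) → 0 ≤ t → t ≤ 1 →
    (tripGo prev t l = true ↔ (3 ≤ t + 1 + (l.count prev : Int)) ∨ ∃ v, 3 ≤ l.count v) := by
  induction l with
  | nil =>
    intro prev t _ h0 h1
    simp only [tripGo, List.count_nil]
    constructor
    · intro h; cases h
    · rintro (h | ⟨v, hv⟩) <;> simp at * <;> omega
  | cons x rest ih =>
    intro prev t hp h0 h1
    rcases List.pairwise_cons.mp hp with ⟨hall, hp'⟩
    by_cases he : x = prev
    · subst he
      simp only [tripGo, eq_self_iff_true, if_true]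
      have ht : t = 0 ∨ t = 1 := by omega
      rcases ht with rfl | rfl
      · rw [show ((2:Int) ≤ 0 + 1 : Bool) = false from by decide, Bool.false_or]
        rw [show ((0:Int) + 1) = 1 from by norm_num, ih x 1 hp' (by omega) (by omega)]
        constructor
        · rintro (h | ⟨v, hv⟩)
          · left; simp [List.count_cons]; omega
          · right; exact ⟨v, by simp [List.count_cons]; omega⟩
        · rintro (h | ⟨v, hv⟩)
          · left; simp [List.count_cons] at h ⊢; omega
          · by_cases hvx : v = x
            · subst hvx; left; simp [List.count_cons] at hv ⊢; omega
            · right; exact ⟨v, by simpa [List.count_cons, hvx, Ne.symm hvx] using hv⟩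
      · rw [show ((2:Int) ≤ 1 + 1 : Bool) = true from by decide, Bool.true_or]
        simp only [true_iff]
        left; simp [List.count_cons]; omega
    · have hlt : prev < x := lt_of_le_of_ne (hall x (List.mem_cons_self)) (Ne.symm he)
      have hnm : prev ∉ x :: rest := by
        intro hm
        rcases List.mem_cons.mp hm with rfl | hm'
        · omega
        · exact absurd ((List.pairwise_cons.mp hp').1 prev hm') (by omega)
      have hc0 : (x :: rest).count prev = 0 := List.count_eq_zero.mpr hnm
      simp only [tripGo, if_neg he]
      rw [show ((2:Int) ≤ 0 : Bool) = false from by decide, Bool.false_or]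
      rw [ih x 0 hp' le_rfl (by omega)]
      rw [hc0]
      constructor
      · rintro (h | ⟨v, hv⟩)
        · right; exact ⟨x, by simp [List.count_cons]; omega⟩
        · right; exact ⟨v, by simp [List.count_cons]; omega⟩
      · rintro (h | ⟨v, hv⟩)
        · exfalso; simp at h; omega
        · by_cases hvx : v = x
          · subst hvx; left; simp [List.count_cons] at hv; omega
          · right; exact ⟨v, by simpa [List.count_cons, hvx, Ne.symm hvx] using hv⟩

theorem runGo_iff (l : List Int) : ∀ prev (r : Int),
    (prev :: l).Pairwise (· ≤ ·) → 0 ≤ r → r ≤ 1 →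
    (runGo prev r l = true ↔ Run3 (prev :: l) ∨ (r = 1 ∧ prev + 1 ∈ l)) := by
  induction l with
  | nil =>
    intro prev r _ _ _
    simp only [runGo, Run3]
    constructor
    · intro h; exact absurd h (by decide)
    · rintro (⟨y, hy, hy1, hy2⟩ | ⟨_, h⟩)
      · simp only [List.mem_singleton] at hy hy1 hy2; omega
      · simp at h
  | cons x rest ih =>
    intro prev r hp h0 h1
    rcases List.pairwise_cons.mp hp with ⟨hall, hp'⟩
    have hallr := (List.pairwise_cons.mp hp').1
    by_cases hs : x = prev + 1
    · subst hs
      simp only [runGo, eq_self_iff_true, if_true]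
      have hr : r = 0 ∨ r = 1 := by omega
      rcases hr with rfl | rfl
      · rw [show (decide ((2:Int) ≤ 0 + 1)) = false from by decide, Bool.false_or]
        rw [show ((0:Int) + 1) = 1 from by norm_num, ih (prev + 1) 1 hp' (by omega) (by omega)]
        constructor
        · rintro (⟨y, hy, hy1, hy2⟩ | ⟨_, hmem⟩)
          · exact Or.inl ⟨y, List.mem_cons_of_mem _ hy, List.mem_cons_of_mem _ hy1,
              List.mem_cons_of_mem _ hy2⟩
          · have h2 : prev + 1 + 1 = prev + 2 := by ring
            rw [h2] at hmem
            exact Or.inl ⟨prev, List.mem_cons_self, by simp,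
              List.mem_cons_of_mem _ (List.mem_cons_of_mem _ hmem)⟩
        · rintro (⟨y, hy, hy1, hy2⟩ | ⟨h01, _⟩)
          · have hge : ∀ z ∈ prev :: (prev + 1) :: rest, prev ≤ z := by
              intro z hz
              rcases List.mem_cons.mp hz with rfl | hz'
              · exact le_rfl
              · exact hall z hz'
            have hyge : prev ≤ y := hge y hy
            rcases List.mem_cons.mp hy1 with h | hy1'
            · exfalso; omega
            rcases List.mem_cons.mp hy2 with h | hy2'
            · exfalso; omega
            rcases List.mem_cons.mp hy with rfl | hy'
            · rcases List.mem_cons.mp hy2' with h | hm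
              · exfalso; omega
              · exact Or.inr ⟨rfl, by rwa [show y + 1 + 1 = y + 2 from by ring]⟩
            · exact Or.inl ⟨y, hy', hy1', hy2'⟩
          · exact absurd h01 (by omega)
      · rw [show (decide ((2:Int) ≤ 1 + 1)) = true from by decide, Bool.true_or]
        exact ⟨fun _ => Or.inr ⟨rfl, List.mem_cons_self⟩, fun _ => rfl⟩
    · by_cases he : x = prev
      · subst he
        simp only [runGo, if_neg hs, if_neg (show ¬x ≠ x from fun h => h rfl)]
        have hd : (decide ((2:Int) ≤ r)) = false := decide_eq_false (by omega)
        rw [hd, Bool.false_or, ih x r hp' h0 h1]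
        have hmem : ∀ z : Int, z ∈ x :: x :: rest ↔ z ∈ x :: rest := by
          intro z; simp only [List.mem_cons]; tauto
        have hx1 : x + 1 ≠ x := by omega
        constructor
        · rintro (⟨y, hy, hy1, hy2⟩ | ⟨hr1, hm⟩)
          · exact Or.inl ⟨y, (hmem y).mpr hy, (hmem _).mpr hy1, (hmem _).mpr hy2⟩
          · exact Or.inr ⟨hr1, List.mem_cons_of_mem _ hm⟩
        · rintro (⟨y, hy, hy1, hy2⟩ | ⟨hr1, hm⟩)
          · exact Or.inl ⟨y, (hmem y).mp hy, (hmem _).mp hy1, (hmem _).mp hy2⟩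
          · rcases List.mem_cons.mp hm with h | hm'
            · exact absurd h hx1
            · exact Or.inr ⟨hr1, hm'⟩
      · have hlt : prev < x := lt_of_le_of_ne (hall x List.mem_cons_self) (Ne.symm he)
        have hge2 : prev + 2 ≤ x := by omega
        simp only [runGo, if_neg hs, if_pos he]
        rw [show (decide ((2:Int) ≤ 0)) = false from by decide, Bool.false_or]
        rw [ih x 0 hp' le_rfl (by omega)]
        have hge : ∀ z ∈ x :: rest, prev + 2 ≤ z := by
          intro z hz
          rcases List.mem_cons.mp hz with rfl | hz'
          · exact hge2
          · exact le_trans hge2 (hallr z hz')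
        constructor
        · rintro (⟨y, hy, hy1, hy2⟩ | ⟨h01, _⟩)
          · exact Or.inl ⟨y, List.mem_cons_of_mem _ hy, List.mem_cons_of_mem _ hy1,
              List.mem_cons_of_mem _ hy2⟩
          · exact absurd h01 (by omega)
        · rintro (⟨y, hy, hy1, hy2⟩ | ⟨hr1, hm⟩)
          · have hyge : prev ≤ y := by
              rcases List.mem_cons.mp hy with rfl | h
              · exact le_rfl
              · exact le_trans (by omega) (hge y h)
            rcases List.mem_cons.mp hy1 with h | hy1'
            · exfalso; omega
            rcases List.mem_cons.mp hy2 with h | hy2'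
            · exfalso; omega
            rcases List.mem_cons.mp hy with rfl | hy'
            · exact absurd (hge _ hy1') (by omega)
            · exact Or.inl ⟨y, hy', hy1', hy2'⟩
          · exact absurd (hge _ hm) (by omega)

theorem babygin_iff (li : List Int) :
    babygin li = true ↔
      (∃ v, 3 ≤ (PySem.List.sorted li (fun x => x) false).count v) ∨
        Run3 (PySem.List.sorted li (fun x => x) false) := by
  unfold babygin
  cases hs : PySem.List.sorted li (fun x => x) false with
  | nil =>
    simp only [Run3, List.count_nil, List.not_mem_nil]
    constructor
    · intro h; exact absurd h (by decide)
    · rintro (⟨v, hv⟩ | ⟨y, hy, _, _⟩)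
      · omega
      · exact hy.elim
  | cons h rest =>
    have hpw : (h :: rest).Pairwise (· ≤ ·) := by
      have := PySem.List.sorted_pairwise (xs := li) (key := fun x => x)
      rw [hs] at this
      simpa using this
    change babyginGo h 0 0 rest = true ↔ _
    rw [babyginGo_eq, Bool.or_eq_true,
        tripGo_iff rest h 0 hpw le_rfl (by omega),
        runGo_iff rest h 0 hpw le_rfl (by omega)]
    constructor
    · rintro ((h3 | ⟨v, hv⟩) | (hr | ⟨h01, _⟩))
      · left; exact ⟨h, by simp [List.count_cons]; omega⟩
      · left; exact ⟨v, by simp [List.count_cons]; omega⟩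
      · right; exact hr
      · exact absurd h01 (by omega)
    · rintro (⟨v, hv⟩ | hr)
      · left
        by_cases hvh : v = h
        · subst hvh; left; simp [List.count_cons] at hv; omega
        · right; exact ⟨v, by simpa [List.count_cons, hvh, Ne.symm hvh] using hv⟩
      · right; exact Or.inl hr

theorem babygin_alt_iff (li : List Int) :
    babygin_alt li = true ↔
      (∃ v, 3 ≤ (PySem.List.sorted li (fun x => x) false).count v) ∨
        Run3 (PySem.List.sorted li (fun x => x) false) := by
  unfold babygin_alt
  set s := PySem.List.sorted li (fun x => x) false with hsdef
  have hval : (PySem.Dict.counter s).values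
      = (PySem.Set.ofList s).map (fun k => ((s.count k : Int))) := by
    rw [PySem.Dict.values_eq_map_keys _ (by
          rw [PySem.Dict.keys_counter]; exact PySem.Set.nodup_ofList s) (0 : Int),
        PySem.Dict.keys_counter]
    exact List.map_congr_left (fun a _ => PySem.Dict.getD_counter s a)
  simp only [Run3, hval, PySem.Dict.keys_counter]
  split_ifs with hany
  · simp only [true_iff]
    rw [List.any_map, List.any_eq_true] at hany
    obtain ⟨v, _, hc⟩ := hany
    have : (3 : Int) ≤ (s.count v : Int) := of_decide_eq_true hc
    exact Or.inl ⟨v, by exact_mod_cast this⟩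
  · rw [List.any_eq_true]
    constructor
    · rintro ⟨v, hv, hc⟩
      rw [Bool.and_eq_true, PySem.Dict.contains_counter, PySem.Dict.contains_counter] at hc
      exact Or.inr ⟨v, (PySem.Set.mem_ofList _ _).mp hv,
        List.contains_iff_mem.mp hc.1, List.contains_iff_mem.mp hc.2⟩
    · rintro (⟨v, hv⟩ | ⟨y, hy, hy1, hy2⟩)
      · exfalso
        apply hany
        rw [List.any_map, List.any_eq_true]
        refine ⟨v, (PySem.Set.mem_ofList _ _).mpr ?_, decide_eq_true (show (3:Int) ≤ ((s.count v : Nat) : Int) by exact_mod_cast hv)⟩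
        exact List.count_pos_iff.mp (by omega)
      · refine ⟨y, (PySem.Set.mem_ofList _ _).mpr hy, ?_⟩
        rw [Bool.and_eq_true, PySem.Dict.contains_counter, PySem.Dict.contains_counter]
        exact ⟨List.contains_iff_mem.mpr hy1, List.contains_iff_mem.mpr hy2⟩

-- ===== VERDICT (by name: the statement is the Claim_ definition above) =====
theorem babygin_spec : Claim_equal_babygin := by
  intro li _
  unfold Spec_babygin
  have := (babygin_iff li).trans (babygin_alt_iff li).symm
  exact Bool.coe_iff_coe.mp this
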